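-- pv_equiv track=rewrite | github.com/henrikiscat/CSVtoPlot | my_plotter.py | count_units
-- ===== SOURCE A (Python) =====
-- def count_units(units):
--     unit = units[0]
--     n = 1
--     for x in units[1:]:
--         if x != unit:
--             n += 1
--             unit = x
--     return n
-- ===== SOURCE B (Python) =====
-- def count_units(units):
--     # Two-pointer run skipping: the outer loop visits one run per iteration,
--     # the inner loop advances j past the whole run.  Empty list -> 0
--     # (A raises IndexError there).
--     if not units:
--         return 0
--     n = 0
--     i = 0
--     while i < len(units):
--         u = units[i]
--         j = i + 1
--         while j < len(units) and units[j] == u: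
--             j += 1
--         n += 1
--         i = j
--     return n
-- ===== Notes on version B (the rewrite author's own statement) =====
-- stated objective: alternative
-- what changed: Replaces A's single element-wise scan tracking the last seen unit with a two-pointer run-skipping loop: the outer loop counts one run per iteration while an inner loop advances the index past each whole run; Pre_ excludes only the empty list, where A raises IndexError on units[0] and B returns 0.
import Mathlib
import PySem

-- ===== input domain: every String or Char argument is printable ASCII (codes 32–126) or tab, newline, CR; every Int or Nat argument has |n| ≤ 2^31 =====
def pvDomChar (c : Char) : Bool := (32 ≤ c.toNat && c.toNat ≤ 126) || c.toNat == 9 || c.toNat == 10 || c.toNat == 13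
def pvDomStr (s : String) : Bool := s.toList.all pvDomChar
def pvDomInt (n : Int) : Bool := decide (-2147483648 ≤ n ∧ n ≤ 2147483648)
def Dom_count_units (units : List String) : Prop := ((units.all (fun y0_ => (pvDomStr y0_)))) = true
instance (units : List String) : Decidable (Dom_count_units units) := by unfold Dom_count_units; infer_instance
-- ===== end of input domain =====

-- B counts runs with a two-pointer skip loop instead of A's last-seen-state scan (objective: alternative);
-- A raises IndexError on [], excluded by Pre_, where B returns 0.

-- ===== PORT A =====
def count_units (units : List String) : Int :=
  match units with
  | [] => 0  -- Python raises IndexError on units[0] here; excluded by Pre_count_units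
  | unit :: _ =>
    ((PySem.List.slice units (some 1) none).foldl
      (fun (s : Int × String) x => if x ≠ s.2 then (s.1 + 1, x) else s) (1, unit)).1

-- ===== PORT B =====
-- inner while loop: advance j past the run of elements equal to u
def cu_skip (units : List String) (u : String) (j : Nat) : Nat :=
  if h : j < units.length then
    if units[j]! == u then cu_skip units u (j + 1) else j
  else j
termination_by units.length - j

theorem cu_skip_le (units : List String) (u : String) (j : Nat) : j ≤ cu_skip units u j := by
  fun_induction cu_skip with
  | case1 j h heq ih => omega
  | case2 => omega
  | case3 => omega

-- outer while loop: one run per iteration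
def cu_loop (units : List String) (i : Nat) (n : Int) : Int :=
  if h : i < units.length then
    cu_loop units (cu_skip units units[i]! (i + 1)) (n + 1)
  else n
termination_by units.length - i
decreasing_by
  have := cu_skip_le units units[i]! (i + 1)
  omega

def count_units_alt (units : List String) : Int :=
  if units = [] then 0 else cu_loop units 0 0

-- ===== PRECONDITION & SPEC =====
-- Pre_ excludes the empty list, on which the Python A raises IndexError (units[0]).
def Pre_count_units (units : List String) : Prop := units ≠ []
instance (units : List String) : Decidable (Pre_count_units units) := by unfold Pre_count_units; infer_instance
def pvWitness_count_units : List String := (["kg", "kg", "m"])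

def Spec_count_units (units : List String) (out : Int) : Prop := out = count_units_alt units
instance (units : List String) (out : Int) : Decidable (Spec_count_units units out) := by unfold Spec_count_units; infer_instance

-- ===== CLAIM =====
def Claim_equal_count_units : Prop := ∀ (units : List String), Dom_count_units units → Pre_count_units units → Spec_count_units units (count_units units)

-- ===== LEMMAS AND PROOFS =====
-- proof-only abstraction: number of runs, by structural run-stripping
def pvRuns (units : List String) : Int :=
  match units with
  | [] => 0
  | u :: rest => 1 + pvRuns (rest.dropWhile (fun x => x == u))
termination_by units.length
decreasing_by
  simp only [List.length_cons]
  exact Nat.lt_succ_of_le (List.length_dropWhile_le _ _)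

theorem cu_skip_drop (units : List String) (u : String) (j : Nat) :
    units.drop (cu_skip units u j) = (units.drop j).dropWhile (fun x => x == u) := by
  fun_induction cu_skip with
  | case1 j h heq ih =>
    rw [ih, List.drop_eq_getElem_cons h, List.dropWhile_cons]
    rw [getElem!_pos units j h] at heq
    simp [heq]
  | case2 j h heq =>
    rw [List.drop_eq_getElem_cons h, List.dropWhile_cons]
    rw [getElem!_pos units j h] at heq
    simp [heq]
  | case3 j h =>
    rw [List.drop_eq_nil_of_le (by omega)]
    simp

theorem cu_loop_runs (units : List String) (i : Nat) (n : Int) :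
    cu_loop units i n = n + pvRuns (units.drop i) := by
  fun_induction cu_loop with
  | case1 i n h ih =>
    rw [ih, cu_skip_drop]
    conv_rhs => rw [List.drop_eq_getElem_cons h, pvRuns]
    rw [getElem!_pos units i h]
    ring
  | case2 i n h =>
    rw [List.drop_eq_nil_of_le (by omega)]
    simp [pvRuns]

-- A's fold starting at (n, u) over l equals n plus the run count of what remains after the run of u.
theorem pv_fold_runs (l : List String) (u : String) (n : Int) :
    (l.foldl (fun (s : Int × String) x => if x ≠ s.2 then (s.1 + 1, x) else s) (n, u)).1
      = n + pvRuns (l.dropWhile (fun x => x == u)) := by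
  induction l generalizing u n with
  | nil => simp [pvRuns]
  | cons x xs ih =>
    by_cases h : x = u
    · subst h
      simp only [List.foldl_cons, if_neg (show ¬ (x ≠ x) from fun e => e rfl),
        List.dropWhile_cons, BEq.rfl, if_pos]
      exact ih x n
    · simp only [List.foldl_cons, if_pos (show x ≠ u from h),
        List.dropWhile_cons, show (x == u) = false from beq_false_of_ne h,
        Bool.false_eq_true, if_neg, not_false_iff]
      rw [ih x (n + 1), pvRuns]
      ring

-- ===== VERDICT =====
theorem count_units_spec : Claim_equal_count_units := by
  intro units _ hpre
  unfold Spec_count_units count_units count_units_alt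
  match units with
  | [] => exact absurd rfl hpre
  | u :: l =>
    rw [if_neg (List.cons_ne_nil u l), cu_loop_runs, List.drop_zero]
    simp only [PySem.List.slice_from_one, List.tail_cons]
    rw [pv_fold_runs l u 1]
    conv_rhs => rw [pvRuns]
    simp
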